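-- pv_equiv track=rewrite | github.com/watershed-climate/langfuse-analysis | lib/langfuse_client.py | group_by_session
-- ===== SOURCE A (Python) =====
-- from collections import defaultdict
--
-- def group_by_session(traces: list[dict]) -> dict[str, list[dict]]:
--     """Group traces by session_id, sorted by timestamp within each session."""
--     sessions: dict[str, list[dict]] = defaultdict(list)
--     for t in traces:
--         sid = t.get("session_id")
--         if sid:
--             sessions[sid].append(t)
--     for trace_list in sessions.values():
--         trace_list.sort(key=lambda t: t.get("timestamp") or "")
--     return dict(sessions)
-- ===== SOURCE B (Python) =====
-- def group_by_session(traces: list[dict]) -> dict[str, list[dict]]: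
--     """Group traces by session_id via ONE global stable sort by timestamp plus
--     per-session comprehensions: stability means each session's traces come out
--     of the global sort already ordered, so no per-session sort (and no
--     defaultdict accumulation) is needed."""
--     sorted_traces = sorted(traces, key=lambda t: t.get("timestamp") or "")
--     sids = list(dict.fromkeys(sid for t in traces if (sid := t.get("session_id"))))
--     return {sid: [t for t in sorted_traces if t.get("session_id") == sid] for sid in sids}
-- ===== Notes on version B (the rewrite author's own statement) =====
-- stated objective: alternative
-- what changed: Instead of accumulating a defaultdict and then sorting each session's list, B does one global stable sort by timestamp, collects the first-appearance-ordered session ids, and builds each group by a comprehension over the sorted list (stability makes each group already ordered, so no per-group sort and no mutable dict of lists).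
import Mathlib
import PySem

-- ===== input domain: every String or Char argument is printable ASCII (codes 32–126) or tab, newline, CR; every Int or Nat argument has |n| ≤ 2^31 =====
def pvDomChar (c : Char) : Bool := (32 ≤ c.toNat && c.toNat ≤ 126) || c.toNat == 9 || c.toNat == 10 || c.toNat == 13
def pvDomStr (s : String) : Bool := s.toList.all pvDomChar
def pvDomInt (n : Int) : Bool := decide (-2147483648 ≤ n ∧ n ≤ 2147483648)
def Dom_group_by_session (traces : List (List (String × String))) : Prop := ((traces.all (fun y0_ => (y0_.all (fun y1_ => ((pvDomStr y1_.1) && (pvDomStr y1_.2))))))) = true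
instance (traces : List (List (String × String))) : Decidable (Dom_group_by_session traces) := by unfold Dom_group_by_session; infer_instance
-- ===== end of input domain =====

-- B replaces A's defaultdict accumulation + per-session sorts by one global stable sort by
-- timestamp, a deduplicated session-id list, and per-session comprehensions; same return value.

-- t.get(k) on a trace dict
def pvGet (t : List (String × String)) (k : String) : Option String := (PySem.Dict.mk t).get? k

-- ===== PORT A =====
def group_by_session (traces : List (List (String × String))) : List (String × List (List (String × String))) :=
  let sessions := traces.foldl (fun d t =>
      match pvGet t "session_id" with
      | some sid => if sid == "" then d else d.modify sid [] (· ++ [t])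
      | none => d) PySem.Dict.empty
  sessions.items.map (fun kv =>
    (kv.1, PySem.List.sorted kv.2 (fun t => (pvGet t "timestamp").getD "") false))

-- ===== PORT B =====
def group_by_session_alt (traces : List (List (String × String))) : List (String × List (List (String × String))) :=
  let sortedTraces := PySem.List.sorted traces (fun t => (pvGet t "timestamp").getD "") false
  let sids := PySem.List.dedup (traces.filterMap (fun t =>
      (pvGet t "session_id").bind (fun sid => if sid == "" then none else some sid)))
  sids.map (fun sid => (sid, sortedTraces.filter (fun t => pvGet t "session_id" == some sid)))

-- ===== PRECONDITION & SPEC =====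
def Spec_group_by_session (traces : List (List (String × String))) (out : List (String × List (List (String × String)))) : Prop := out = group_by_session_alt traces
instance (traces : List (List (String × String))) (out : List (String × List (List (String × String)))) : Decidable (Spec_group_by_session traces out) := by unfold Spec_group_by_session; infer_instance

-- ===== CLAIM (what is proved, stated in full; the proofs are below) =====
def Claim_equal_group_by_session : Prop := ∀ (traces : List (List (String × String))), Dom_group_by_session traces → Spec_group_by_session traces (group_by_session traces)

-- ===== LEMMAS AND PROOFS =====

-- the "effective" session id: some sid iff A's/B's `if sid:` branch fires
def effSid (t : List (String × String)) : Option String :=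
  match pvGet t "session_id" with
  | some s => if s == "" then none else some s
  | none => none

def tsKey (t : List (String × String)) : String := (pvGet t "timestamp").getD ""

def pairsOf (l : List (List (String × String))) : List (String × List (String × String)) :=
  l.filterMap (fun t => (effSid t).map (fun s => (s, t)))

theorem pairsOf_cons_none (t : List (String × String)) (l : List (List (String × String)))
    (he : effSid t = none) : pairsOf (t :: l) = pairsOf l := by
  simp [pairsOf, he]

theorem pairsOf_cons_some (t : List (String × String)) (l : List (List (String × String)))
    (s : String) (he : effSid t = some s) : pairsOf (t :: l) = (s, t) :: pairsOf l := by
  simp [pairsOf, he]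

-- a loop that skips untruthy session ids IS a loop over pairsOf
theorem foldl_opt {γ : Type} (F : γ → String → List (String × String) → γ)
    (l : List (List (String × String))) (init : γ) :
    l.foldl (fun d t =>
      match pvGet t "session_id" with
      | some sid => if sid == "" then d else F d sid t
      | none => d) init
    = (pairsOf l).foldl (fun d q => F d q.1 q.2) init := by
  induction l generalizing init with
  | nil => rfl
  | cons t l ih =>
    rw [List.foldl_cons]
    cases h : pvGet t "session_id" with
    | none =>
      have he : effSid t = none := by simp [effSid, h]
      rw [pairsOf_cons_none t l he]
      exact ih init
    | some s =>
      by_cases hs : s = ""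
      · have he : effSid t = none := by simp [effSid, h, hs]
        rw [pairsOf_cons_none t l he]
        simp only [hs]
        simpa using ih init
      · have he : effSid t = some s := by simp [effSid, h, hs]
        rw [pairsOf_cons_some t l s he]
        simp only [List.foldl_cons]
        have : (if s == "" then init else F init s t) = F init s t := by simp [hs]
        rw [this]
        exact ih (F init s t)

theorem foldl_opt_modify (l : List (List (String × String)))
    (init : PySem.Dict String (List (List (String × String)))) :
    l.foldl (fun d t =>
      match pvGet t "session_id" with
      | some sid => if sid == "" then d else d.modify sid [] (· ++ [t])
      | none => d) init
    = (pairsOf l).foldl (fun d q => d.modify q.1 [] (· ++ [q.2])) init :=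
  foldl_opt (fun d sid t => d.modify sid [] (· ++ [t])) l init

theorem map_fst_pairsOf (l : List (List (String × String))) :
    (pairsOf l).map Prod.fst = l.filterMap effSid := by
  induction l with
  | nil => rfl
  | cons t l ih =>
    cases h : effSid t with
    | none => rw [pairsOf_cons_none t l h]; simp [h, ih]
    | some s => rw [pairsOf_cons_some t l s h]; simp [h, ih]

theorem filter_pairsOf (l : List (List (String × String))) (s : String) :
    (((pairsOf l).filter (fun q => q.1 == s)).map (·.2)) = l.filter (fun t => effSid t == some s) := by
  induction l with
  | nil => rfl
  | cons t l ih =>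
    cases h : effSid t with
    | none => rw [pairsOf_cons_none t l h]; simp [h, ih]
    | some s' =>
      rw [pairsOf_cons_some t l s' h]
      by_cases hs : s' = s
      · subst hs; simp [h, ih]
      · simp [h, hs, ih]

-- the grouping dict of A
def groupD (l : List (List (String × String))) : PySem.Dict String (List (List (String × String))) :=
  (pairsOf l).foldl (fun d q => d.modify q.1 [] (· ++ [q.2])) PySem.Dict.empty

theorem keys_groupD (l : List (List (String × String))) :
    (groupD l).keys = PySem.Set.ofList (l.filterMap effSid) := by
  unfold groupD
  rw [PySem.Dict.keys_foldl_modify_key]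
  simp [map_fst_pairsOf, PySem.Set.update_nil_left]

theorem nodup_keys_groupD (l : List (List (String × String))) : (groupD l).keys.Nodup := by
  rw [keys_groupD]; exact PySem.Set.nodup_ofList _

theorem getD_groupD (l : List (List (String × String))) (s : String) :
    (groupD l).getD s [] = l.filter (fun t => effSid t == some s) := by
  unfold groupD
  rw [PySem.Dict.getD_foldl_modify_append]
  simp [filter_pairsOf]

theorem items_groupD (l : List (List (String × String))) :
    (groupD l).items = (PySem.Set.ofList (l.filterMap effSid)).map
      (fun s => (s, l.filter (fun t => effSid t == some s))) := by
  rw [PySem.Dict.items_eq_map_keys (groupD l) (nodup_keys_groupD l) []]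
  rw [keys_groupD]
  exact List.map_congr_left (fun s _ => by rw [getD_groupD])

-- ---- stable sort commutes with filter ----

theorem pairwise_insertBy {α : Type} (key : α → String) (x : α) (ys : List α)
    (h : ys.Pairwise (fun a b => key a ≤ key b)) :
    (PySem.List.insertBy (fun a b => decide (key a < key b)) x ys).Pairwise (fun a b => key a ≤ key b) := by
  induction ys with
  | nil => simp [PySem.List.insertBy]
  | cons y ys ih =>
    rw [List.pairwise_cons] at h
    show (if decide (key x < key y) then x :: y :: ys else
        y :: PySem.List.insertBy (fun a b => decide (key a < key b)) x ys).Pairwise _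
    by_cases hb : key x < key y
    · simp only [hb, decide_true, if_true]
      refine List.pairwise_cons.mpr ⟨?_, List.pairwise_cons.mpr h⟩
      intro z hz
      rcases List.mem_cons.mp hz with rfl | hz
      · exact le_of_lt hb
      · exact le_of_lt (lt_of_lt_of_le hb (h.1 z hz))
    · simp only [hb, decide_false]
      refine List.pairwise_cons.mpr ⟨?_, ih h.2⟩
      intro z hz
      rcases (PySem.List.mem_insertBy _ _ _ _).mp hz with rfl | hz
      · exact le_of_not_gt hb
      · exact h.1 z hz

theorem filter_insertBy_neg {α : Type} (b : α → α → Bool) (p : α → Bool) (x : α) (ys : List α)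
    (hx : p x = false) :
    (PySem.List.insertBy b x ys).filter p = ys.filter p := by
  induction ys with
  | nil => simp [PySem.List.insertBy, hx]
  | cons y ys ih =>
    show (if b x y then x :: y :: ys else y :: PySem.List.insertBy b x ys).filter p = _
    by_cases hb : b x y
    · simp [hb, hx]
    · cases hp : p y <;> simp [hb, hp, ih]

theorem filter_insertBy_pos {α : Type} (key : α → String) (p : α → Bool) (x : α) (ys : List α)
    (hs : ys.Pairwise (fun a b => key a ≤ key b)) (hx : p x = true) :
    (PySem.List.insertBy (fun a b => decide (key a < key b)) x ys).filter p
      = PySem.List.insertBy (fun a b => decide (key a < key b)) x (ys.filter p) := by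
  induction ys with
  | nil => simp [PySem.List.insertBy, hx]
  | cons y ys ih =>
    rw [List.pairwise_cons] at hs
    have hstep : PySem.List.insertBy (fun a b => decide (key a < key b)) x (y :: ys)
        = if key x < key y then x :: y :: ys
          else y :: PySem.List.insertBy (fun a b => decide (key a < key b)) x ys := by
      show (if decide (key x < key y) then _ else _) = _
      by_cases hb : key x < key y <;> simp [hb]
    rw [hstep]
    by_cases hb : key x < key y
    · rw [if_pos hb]
      cases hp : p y
      · simp only [List.filter_cons, hx, hp, Bool.false_eq_true, if_true, if_false]
        cases hf : ys.filter p with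
        | nil => rfl
        | cons z rest =>
          have hz : z ∈ ys := List.mem_of_mem_filter (hf ▸ List.mem_cons_self)
          have hxz : key x < key z := lt_of_lt_of_le hb (hs.1 z hz)
          show _ = if decide (key x < key z) then _ else _
          simp [hxz]
      · simp only [List.filter_cons, hx, hp, if_true]
        show _ = if decide (key x < key y) then _ else _
        simp [hb]
    · rw [if_neg hb]
      cases hp : p y
      · simp only [List.filter_cons, hp, Bool.false_eq_true, if_false]
        exact ih hs.2
      · simp only [List.filter_cons, hp, if_true]
        show _ = if decide (key x < key y) then _ else _
        rw [if_neg (by simp [hb]), ih hs.2]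

theorem filter_foldl_insertBy {α : Type} (key : α → String) (p : α → Bool)
    (l : List α) (acc : List α) (hs : acc.Pairwise (fun a b => key a ≤ key b)) :
    (l.foldl (fun acc x => PySem.List.insertBy (fun a b => decide (key a < key b)) x acc) acc).filter p
      = (l.filter p).foldl (fun acc x => PySem.List.insertBy (fun a b => decide (key a < key b)) x acc) (acc.filter p) := by
  induction l generalizing acc with
  | nil => rfl
  | cons x l ih =>
    rw [List.foldl_cons, List.filter_cons]
    cases hp : p x
    · simp only [Bool.false_eq_true, if_false]
      rw [ih _ (pairwise_insertBy key x acc hs), filter_insertBy_neg _ p x acc hp]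
    · simp only [if_true]
      rw [ih _ (pairwise_insertBy key x acc hs), filter_insertBy_pos key p x acc hs hp,
          List.foldl_cons]

theorem sorted_filter_comm {α : Type} (key : α → String) (p : α → Bool) (l : List α) :
    (PySem.List.sorted l key false).filter p = PySem.List.sorted (l.filter p) key false := by
  rw [PySem.List.sorted_eq_foldl_insertBy, PySem.List.sorted_eq_foldl_insertBy,
      filter_foldl_insertBy key p l [] (by simp)]
  rfl

-- ---- assembling both ports ----

theorem portA_eq (traces : List (List (String × String))) :
    group_by_session traces
      = (PySem.Set.ofList (traces.filterMap effSid)).map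
          (fun s => (s, PySem.List.sorted (traces.filter (fun t => effSid t == some s)) tsKey false)) := by
  simp only [group_by_session]
  rw [foldl_opt_modify]
  show (groupD traces).items.map _ = _
  rw [items_groupD, List.map_map]
  exact List.map_congr_left (fun s _ => rfl)

-- B's raw-get filter equals the effSid filter when the target sid is nonempty
theorem filter_get_eq_effSid (l : List (List (String × String))) (s : String) (hs : s ≠ "") :
    l.filter (fun t => pvGet t "session_id" == some s)
      = l.filter (fun t => effSid t == some s) := by
  refine List.filter_congr (fun t _ => ?_)
  cases h : pvGet t "session_id" with
  | none => simp [effSid, h]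
  | some s' =>
    by_cases h' : s' = ""
    · subst h'; simp [effSid, h, Ne.symm hs]
    · simp [effSid, h, h']

theorem portB_eq (traces : List (List (String × String))) :
    group_by_session_alt traces
      = (PySem.Set.ofList (traces.filterMap effSid)).map
          (fun s => (s, (PySem.List.sorted traces tsKey false).filter (fun t => effSid t == some s))) := by
  simp only [group_by_session_alt]
  have hfm : traces.filterMap (fun t =>
      (pvGet t "session_id").bind (fun sid => if sid == "" then none else some sid))
      = traces.filterMap effSid :=
    List.filterMap_congr (fun t _ => by
      cases h : pvGet t "session_id" <;> simp [effSid, h])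
  rw [hfm, PySem.List.dedup_eq_ofList]
  refine List.map_congr_left (fun s hsmem => ?_)
  have hsm : s ∈ traces.filterMap effSid := (PySem.Set.mem_ofList _ _).mp hsmem
  obtain ⟨t, -, ht⟩ := List.mem_filterMap.mp hsm
  have hs : s ≠ "" := by
    unfold effSid at ht
    cases h : pvGet t "session_id" with
    | none => rw [h] at ht; exact absurd ht (by simp)
    | some s' =>
      rw [h] at ht
      by_cases h' : s' = ""
      · simp [h'] at ht
      · simp [h'] at ht; exact ht ▸ h'
  rw [filter_get_eq_effSid _ s hs]
  rfl

-- ===== VERDICT (by name: the statement is the Claim_ definition above) =====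
theorem group_by_session_spec : Claim_equal_group_by_session := by
  intro traces _
  show group_by_session traces = group_by_session_alt traces
  rw [portA_eq, portB_eq]
  exact List.map_congr_left (fun s _ => by
    rw [sorted_filter_comm tsKey (fun t => effSid t == some s) traces])
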